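-- pv_equiv track=rewrite | github.com/afkbot-io/afkbotio | afkbot/services/agent_loop/llm_request_compaction.py | _split_context_sections
-- ===== SOURCE A (Python) =====
-- def _split_context_sections(context: str) -> list[tuple[str, str]]:
--     sections: list[tuple[str, str]] = []
--     current_heading: str | None = None
--     current_lines: list[str] = []
--     for line in context.splitlines():
--         if line.startswith("# "):
--             if current_heading is not None:
--                 sections.append((current_heading, "\n".join(current_lines).strip()))
--             current_heading = line.strip()
--             current_lines = []
--             continue
--         current_lines.append(line)
--     if current_heading is not None:
--         sections.append((current_heading, "\n".join(current_lines).strip()))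
--     return sections
-- ===== SOURCE B (Python) =====
-- def _split_context_sections(context: str) -> list[tuple[str, str]]:
--     lines = context.splitlines()
--     n = len(lines)
--     sections: list[tuple[str, str]] = []
--     # skip any preamble lines before the first heading
--     i = 0
--     while i < n and not lines[i].startswith("# "):
--         i += 1
--     # each iteration consumes one heading and its body (up to the next heading)
--     while i < n:
--         j = i + 1
--         while j < n and not lines[j].startswith("# "):
--             j += 1
--         sections.append((lines[i].strip(), "\n".join(lines[i + 1:j]).strip()))
--         i = j
--     return sections
-- ===== Notes on version B (the rewrite author's own statement) =====
-- stated objective: alternative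
-- what changed: Replaces the single-pass fold with a pending-heading/accumulator state by a two-level index parser: skip the preamble, then for each heading scan forward to the next heading index and slice the body out directly.
import Mathlib
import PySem

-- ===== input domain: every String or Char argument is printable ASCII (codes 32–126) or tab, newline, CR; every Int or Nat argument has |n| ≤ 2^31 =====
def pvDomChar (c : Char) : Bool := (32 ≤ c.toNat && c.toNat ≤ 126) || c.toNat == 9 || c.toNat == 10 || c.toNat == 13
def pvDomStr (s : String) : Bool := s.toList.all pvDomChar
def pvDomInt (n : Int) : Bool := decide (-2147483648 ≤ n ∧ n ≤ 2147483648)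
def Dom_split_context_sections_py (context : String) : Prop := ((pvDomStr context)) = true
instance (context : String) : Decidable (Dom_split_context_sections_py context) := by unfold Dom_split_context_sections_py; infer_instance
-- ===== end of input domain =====

-- B replaces A's single pass with pending-heading/accumulator state by a two-level index parser
-- (skip preamble, then per heading scan to the next heading index and slice the body out); objective: alternative decomposition.

-- ===== PORT A =====
-- the for-loop of A, as structural recursion over the same state (sections, current_heading, current_lines)
def pvALoop (lines : List String) (sections : List (String × String))
    (current_heading : Option String) (current_lines : List String) : List (String × String) :=
  match lines with
  | [] =>
    match current_heading with
    | some h => sections ++ [(h, PySem.Str.strip (PySem.Str.join "\n" current_lines))]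
    | none => sections
  | line :: rest =>
    if PySem.Str.startswith line "# " then
      match current_heading with
      | some h =>
        pvALoop rest (sections ++ [(h, PySem.Str.strip (PySem.Str.join "\n" current_lines))])
          (some (PySem.Str.strip line)) []
      | none => pvALoop rest sections (some (PySem.Str.strip line)) []
    else pvALoop rest sections current_heading (current_lines ++ [line])

def split_context_sections_py (context : String) : List (String × String) :=
  pvALoop (PySem.Str.splitlines context) [] none []

-- ===== PORT B =====
-- the scan 'while _ < n and not lines[_].startswith("# "): _ += 1' (used for the preamble skip and the inner loop);
-- lines[i] is in range under the guard i < n, so it is ported as lines.getD i ""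
def pvBScan (lines : List String) (n : Nat) (i : Nat) : Nat :=
  if i < n ∧ ¬ (PySem.Str.startswith (lines.getD i "") "# " = true) then pvBScan lines n (i + 1)
  else i
termination_by n - i
decreasing_by omega

-- the port needs this to show the outer loop advances
theorem pvBScan_ge (lines : List String) (n i : Nat) : i ≤ pvBScan lines n i := by
  fun_induction pvBScan lines n i with
  | case1 _ _ ih => omega
  | case2 => omega

-- the outer 'while i < n' loop of B
def pvBOuter (lines : List String) (n : Nat) (sections : List (String × String)) (i : Nat) :
    List (String × String) :=
  if i < n then
    let j := pvBScan lines n (i + 1)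
    pvBOuter lines n
      (sections ++ [(PySem.Str.strip (lines.getD i ""),
        PySem.Str.strip (PySem.Str.join "\n"
          (PySem.List.slice lines (some ((i : Int) + 1)) (some (j : Int)))))]) j
  else sections
termination_by n - i
decreasing_by
  have := pvBScan_ge lines n (i + 1)
  omega

def split_context_sections_py_alt (context : String) : List (String × String) :=
  let lines := PySem.Str.splitlines context
  let n := lines.length
  pvBOuter lines n [] (pvBScan lines n 0)

-- ===== PRECONDITION & SPEC =====
def Spec_split_context_sections_py (context : String) (out : List (String × String)) : Prop := out = split_context_sections_py_alt context
instance (context : String) (out : List (String × String)) : Decidable (Spec_split_context_sections_py context out) := by unfold Spec_split_context_sections_py; infer_instance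

-- ===== CLAIM (what is proved, stated in full; the proofs are below) =====
def Claim_equal_split_context_sections_py : Prop := ∀ (context : String), Dom_split_context_sections_py context → Spec_split_context_sections_py context (split_context_sections_py context)

-- ===== LEMMAS AND PROOFS =====

def pvNoHead (l : String) : Bool := !(PySem.Str.startswith l "# ")

-- the common canonical form: one section per heading, body = lines up to the next heading
def pvSecs : List String → List (String × String)
  | [] => []
  | l :: rest =>
    if PySem.Str.startswith l "# " then
      (PySem.Str.strip l,
        PySem.Str.strip (PySem.Str.join "\n" (rest.takeWhile pvNoHead))) ::
        pvSecs (rest.dropWhile pvNoHead)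
    else pvSecs rest
termination_by l => l.length
decreasing_by
  · have := (List.dropWhile_sublist (l := rest) (p := pvNoHead)).length_le; simp; omega
  · simp

theorem pvNoHead_false {l : String} (h : PySem.Str.startswith l "# " = true) :
    pvNoHead l = false := by unfold pvNoHead; rw [h]; rfl

theorem pvNoHead_true {l : String} (h : ¬ PySem.Str.startswith l "# " = true) :
    pvNoHead l = true := by unfold pvNoHead; rw [Bool.eq_false_iff.mpr h]; rfl

theorem pvDropLenTakeWhile {α : Type} (p : α → Bool) (l : List α) :
    l.drop (l.takeWhile p).length = l.dropWhile p := by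
  induction l with
  | nil => simp
  | cons a l ih =>
    by_cases hp : p a = true
    · rw [List.takeWhile_cons, List.dropWhile_cons, hp]
      simpa using ih
    · rw [List.takeWhile_cons, List.dropWhile_cons, Bool.eq_false_iff.mpr hp]
      simp

theorem pvALoop_some (lines : List String) :
    ∀ (sections : List (String × String)) (h : String) (cur : List String),
    pvALoop lines sections (some h) cur =
      sections ++ (h, PySem.Str.strip (PySem.Str.join "\n" (cur ++ lines.takeWhile pvNoHead))) ::
        pvSecs (lines.dropWhile pvNoHead) := by
  induction lines with
  | nil => intro s h cur; simp only [pvALoop, pvSecs, List.takeWhile_nil, List.dropWhile_nil,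
      List.append_nil]
  | cons line rest ih =>
    intro s h cur
    by_cases hl : PySem.Str.startswith line "# " = true
    · rw [pvALoop, if_pos hl, ih, List.takeWhile_cons, List.dropWhile_cons,
        pvNoHead_false hl]
      simp only [if_false, Bool.false_eq_true, List.append_nil, pvSecs, if_pos hl]
      simp
    · rw [pvALoop, if_neg hl, ih, List.takeWhile_cons, List.dropWhile_cons,
        pvNoHead_true hl]
      simp

theorem pvALoop_none (lines : List String) :
    ∀ (sections : List (String × String)) (cur : List String),
    pvALoop lines sections none cur = sections ++ pvSecs lines := by
  induction lines with
  | nil => intro s cur; simp [pvALoop, pvSecs]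
  | cons line rest ih =>
    intro s cur
    by_cases hl : PySem.Str.startswith line "# " = true
    · rw [pvALoop, if_pos hl, pvALoop_some, pvSecs, if_pos hl]
      simp
    · rw [pvALoop, if_neg hl, ih, pvSecs, if_neg hl]

theorem pvBScan_eq (lines : List String) (i : Nat) (hi : i ≤ lines.length) :
    pvBScan lines lines.length i = i + ((lines.drop i).takeWhile pvNoHead).length := by
  fun_induction pvBScan lines lines.length i with
  | case1 i hcond ih =>
    obtain ⟨hlt, hns⟩ := hcond
    have hb : pvNoHead (lines.getD i "") = true := pvNoHead_true hns
    rw [List.getD_eq_getElem _ _ hlt] at hb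
    rw [ih (by omega), List.drop_eq_getElem_cons hlt, List.takeWhile_cons, hb]
    simp
    omega
  | case2 i hcond =>
    rcases Nat.lt_or_ge i lines.length with hlt | hge
    · have hs : PySem.Str.startswith (lines.getD i "") "# " = true := by
        by_contra hc
        exact hcond ⟨hlt, hc⟩
      have hb : pvNoHead (lines.getD i "") = false := pvNoHead_false hs
      rw [List.getD_eq_getElem _ _ hlt] at hb
      rw [List.drop_eq_getElem_cons hlt, List.takeWhile_cons, hb]
      simp
    · rw [List.drop_eq_nil_of_le hge]
      simp

theorem pvBScan_head (lines : List String) (n i : Nat)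
    (h : pvBScan lines n i < n) :
    PySem.Str.startswith (lines.getD (pvBScan lines n i) "") "# " = true := by
  fun_induction pvBScan lines n i with
  | case1 i hcond ih => exact ih h
  | case2 i hcond =>
    by_contra hc
    exact hcond ⟨h, hc⟩

theorem pvBOuter_eq (lines : List String) (i : Nat) (sections : List (String × String))
    (hi : i ≤ lines.length)
    (hh : i < lines.length → PySem.Str.startswith (lines.getD i "") "# " = true) :
    pvBOuter lines lines.length sections i = sections ++ pvSecs (lines.drop i) := by
  fun_induction pvBOuter lines lines.length sections i with
  | case1 sections i hlt j ih =>
    have hget : lines.getD i "" = lines[i] := List.getD_eq_getElem lines "" hlt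
    have hs : PySem.Str.startswith lines[i] "# " = true := hget ▸ hh hlt
    have hj : j = (i + 1) + ((lines.drop (i + 1)).takeWhile pvNoHead).length :=
      pvBScan_eq lines (i + 1) (by omega)
    have hjle : j ≤ lines.length := by
      have h1 := (List.takeWhile_prefix (l := lines.drop (i + 1)) (p := pvNoHead)).length_le
      have h2 : (lines.drop (i + 1)).length = lines.length - (i + 1) := List.length_drop ..
      omega
    -- the slice lines[i+1:j] is exactly the takeWhile-prefix of lines.drop (i+1)
    have hslice : PySem.List.slice lines (some ((i : Int) + 1)) (some (j : Int)) =
        (lines.drop (i + 1)).takeWhile pvNoHead := by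
      have h1 : ((i : Int) + 1) = ((i + 1 : Nat) : Int) := by push_cast; ring
      rw [h1, PySem.List.slice_natCast, hj]
      have hpre : (lines.drop (i + 1)).takeWhile pvNoHead <+: lines.drop (i + 1) :=
        List.takeWhile_prefix _
      have h2 : (i + 1) + ((lines.drop (i + 1)).takeWhile pvNoHead).length - (i + 1) =
          ((lines.drop (i + 1)).takeWhile pvNoHead).length := by omega
      rw [h2, (List.prefix_iff_eq_take.mp hpre).symm]
    have hdropj : lines.drop j = (lines.drop (i + 1)).dropWhile pvNoHead := by
      rw [hj, ← List.drop_drop, pvDropLenTakeWhile]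
    have hhj : j < lines.length → PySem.Str.startswith (lines.getD j "") "# " = true :=
      fun hjlt => pvBScan_head lines lines.length (i + 1) hjlt
    rw [ih hjle hhj, List.drop_eq_getElem_cons hlt]
    rw [pvSecs, if_pos hs, hget, hslice, hdropj]
    simp
  | case2 sections i hge =>
    rw [List.drop_eq_nil_of_le (by omega)]
    simp [pvSecs]

theorem pvSecs_dropWhile (lines : List String) :
    pvSecs (lines.dropWhile pvNoHead) = pvSecs lines := by
  induction lines with
  | nil => simp
  | cons l rest ih =>
    by_cases hl : PySem.Str.startswith l "# " = true
    · rw [List.dropWhile_cons, pvNoHead_false hl]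
      simp
    · rw [List.dropWhile_cons, pvNoHead_true hl]
      simp only [if_true]
      rw [ih, pvSecs, if_neg hl]

theorem pvMain (lines : List String) :
    pvALoop lines [] none [] =
      pvBOuter lines lines.length [] (pvBScan lines lines.length 0) := by
  have h0 : pvBScan lines lines.length 0 = (lines.takeWhile pvNoHead).length := by
    simpa using pvBScan_eq lines 0 (by omega)
  have hle : pvBScan lines lines.length 0 ≤ lines.length := by
    have := (List.takeWhile_prefix (l := lines) (p := pvNoHead)).length_le
    omega
  rw [pvBOuter_eq lines (pvBScan lines lines.length 0) [] hle
    (fun hlt => pvBScan_head lines lines.length 0 hlt), pvALoop_none, h0]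
  rw [pvDropLenTakeWhile, pvSecs_dropWhile]

-- ===== VERDICT (by name: the statement is the Claim_ definition above) =====
theorem split_context_sections_py_spec : Claim_equal_split_context_sections_py := by
  intro context _
  exact pvMain (PySem.Str.splitlines context)
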